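-- pv_equiv track=rewrite | github.com/ActiveState/OpenKomodoIDE | src/scc/test/utils.py | dedent
-- ===== SOURCE A (Python) =====
-- def dedent(text, skipLeadingEmpty=True):
--     """ Dedent a piece of text, for comparision purposes """
--     lines = text.splitlines()
--     if skipLeadingEmpty and len(lines) > 0 and lines[0] == "":
--         lines = lines[1:] # skip empty line
--     prefix = None
--     for line in lines:
--         remaining = line.lstrip()
--         indent = line[:-len(remaining)] if len(remaining) else line
--         if prefix is None:
--             prefix = indent
--             continue
--         common = ""
--         for i, x in enumerate(prefix[:len(indent)]):
--             if indent[i] != x: break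
--             common += x
--         prefix = common
--     return "\n".join([line[len(prefix):] for line in lines])
-- ===== SOURCE B (Python) =====
-- def dedent(text, skipLeadingEmpty=True):
--     """ Dedent a piece of text, for comparision purposes """
--     lines = text.splitlines()
--     if skipLeadingEmpty and len(lines) > 0 and lines[0] == "":
--         lines = lines[1:]  # skip empty line
--     if not lines:
--         return ""
--     # per-line indent table (whole line when it is empty/all-whitespace)
--     indents = [line[:len(line) - len(line.lstrip())] for line in lines]
--     # common prefix of all indents = common prefix of the lexicographic min and max
--     lo = min(indents)
--     hi = max(indents)
--     k = 0
--     while k < len(lo) and k < len(hi) and lo[k] == hi[k]: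
--         k += 1
--     return "\n".join(line[k:] for line in lines)
-- ===== Notes on version B (the rewrite author's own statement) =====
-- stated objective: alternative
-- what changed: A's incremental fold that shrinks a running prefix with a nested per-character scan per line is replaced by building the per-line indent table once and reducing it in one step via the lexicographic min/max common-prefix trick.
import Mathlib
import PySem

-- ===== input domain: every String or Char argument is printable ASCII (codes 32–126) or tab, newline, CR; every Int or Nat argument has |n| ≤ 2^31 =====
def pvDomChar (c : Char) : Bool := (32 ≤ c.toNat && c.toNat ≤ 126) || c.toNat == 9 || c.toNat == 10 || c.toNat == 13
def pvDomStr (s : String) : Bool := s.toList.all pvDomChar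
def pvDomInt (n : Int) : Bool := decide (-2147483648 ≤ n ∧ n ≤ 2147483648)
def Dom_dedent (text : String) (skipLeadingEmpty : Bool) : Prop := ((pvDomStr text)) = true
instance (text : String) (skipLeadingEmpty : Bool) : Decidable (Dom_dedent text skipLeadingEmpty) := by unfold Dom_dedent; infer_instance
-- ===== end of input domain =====

-- B replaces A's incremental common-prefix fold (with its nested char loop) by an indent table
-- reduced through the lexicographic min/max trick (objective: alternative decomposition, same cost).

-- ===== PORT A =====
-- A's inner loop: `for i, x in enumerate(prefix[:len(indent)]): if indent[i] != x: break; common += x`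
-- (the index i always lies inside `indent` because the scanned list is prefix[:len(indent)], so
--  Python's indent[i] never raises; .getD x is the unreachable out-of-range branch)
def dedentGo (indent : List Char) : Nat → List Char → List Char → List Char
  | _, [], common => common
  | i, x :: rest, common =>
    if (PySem.List.pyGet? indent (i : Int)).getD x ≠ x then common
    else dedentGo indent (i + 1) rest (common ++ [x])

-- `remaining = line.lstrip(); indent = line[:-len(remaining)] if len(remaining) else line`
def dedentIndent (line : List Char) : List Char :=
  let remaining := PySem.Chars.lstrip line
  if remaining.length ≠ 0 then PySem.List.slice line none (some (-(remaining.length : Int))) else line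

-- the `for line in lines:` loop carrying `prefix` (None = not yet set)
def dedentLoop : List (List Char) → Option (List Char) → Option (List Char)
  | [], p => p
  | line :: rest, p =>
    let indent := dedentIndent line
    match p with
    | none => dedentLoop rest (some indent)
    | some pfx =>
        dedentLoop rest (some (dedentGo indent 0 (PySem.List.slice pfx none (some (indent.length : Int))) []))

def dedent (text : String) (skipLeadingEmpty : Bool) : String :=
  let lines0 := PySem.Chars.splitlines text.toList
  let lines := if skipLeadingEmpty = true ∧ 0 < lines0.length ∧ PySem.List.pyGet? lines0 0 = some []
               then PySem.List.slice lines0 (some 1) none else lines0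
  -- Python evaluates len(prefix) only inside the comprehension, i.e. only when lines ≠ [],
  -- and then the loop has set prefix; .getD [] is the unreachable lines = [] case
  let pfx := (dedentLoop lines none).getD []
  String.mk (PySem.Chars.join ['\n'] (lines.map (fun line => PySem.List.slice line (some (pfx.length : Int)) none)))

-- ===== PORT B =====
-- `line[:len(line) - len(line.lstrip())]`
def altIndent (line : List Char) : List Char :=
  PySem.List.slice line none (some ((line.length : Int) - ((PySem.Chars.lstrip line).length : Int)))

-- `k = 0; while k < len(lo) and k < len(hi) and lo[k] == hi[k]: k += 1`
def altK : List Char → List Char → Nat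
  | a :: as, b :: bs => if a = b then altK as bs + 1 else 0
  | _, _ => 0

def dedent_alt (text : String) (skipLeadingEmpty : Bool) : String :=
  let lines0 := PySem.Chars.splitlines text.toList
  let lines := if skipLeadingEmpty = true ∧ 0 < lines0.length ∧ PySem.List.pyGet? lines0 0 = some []
               then PySem.List.slice lines0 (some 1) none else lines0
  if lines = [] then "" else
  let indents := lines.map altIndent
  -- lines ≠ [] so indents ≠ [] and min/max exist; .getD [] is the unreachable empty case
  let lo := (PySem.List.min? indents (fun x => x)).getD []
  let hi := (PySem.List.max? indents (fun x => x)).getD []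
  let k := altK lo hi
  String.mk (PySem.Chars.join ['\n'] (lines.map (fun line => PySem.List.slice line (some (k : Int)) none)))

-- ===== PRECONDITION & SPEC =====
def Spec_dedent (text : String) (skipLeadingEmpty : Bool) (out : String) : Prop := out = dedent_alt text skipLeadingEmpty
instance (text : String) (skipLeadingEmpty : Bool) (out : String) : Decidable (Spec_dedent text skipLeadingEmpty out) := by unfold Spec_dedent; infer_instance

-- ===== CLAIM (what is proved, stated in full; the proofs are below) =====
def Claim_equal_dedent : Prop := ∀ (text : String) (skipLeadingEmpty : Bool), Dom_dedent text skipLeadingEmpty → Spec_dedent text skipLeadingEmpty (dedent text skipLeadingEmpty)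

-- ===== LEMMAS AND PROOFS =====

-- clean mathematical common prefix; both ports' scans are reduced to it
def cp : List Char → List Char → List Char
  | a :: as, b :: bs => if a = b then a :: cp as bs else []
  | _, _ => []

theorem cp_nil_left (b : List Char) : cp [] b = [] := rfl
theorem cp_nil_right (a : List Char) : cp a [] = [] := by cases a <;> rfl

theorem altK_eq_length_cp (a b : List Char) : altK a b = (cp a b).length := by
  induction a generalizing b with
  | nil => cases b <;> simp [altK, cp]
  | cons x as ih =>
    cases b with
    | nil => simp [altK, cp]
    | cons y bs => by_cases h : x = y <;> simp [altK, cp, h, ih]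

theorem cp_prefix_left (a b : List Char) : cp a b <+: a := by
  induction a generalizing b with
  | nil => exact List.nil_prefix
  | cons x as ih =>
    cases b with
    | nil => simp [cp]
    | cons y bs =>
      by_cases h : x = y
      · simpa [cp, h] using ih bs
      · simp [cp, h]

theorem cp_prefix_right (a b : List Char) : cp a b <+: b := by
  induction a generalizing b with
  | nil => exact List.nil_prefix
  | cons x as ih =>
    cases b with
    | nil => simp [cp]
    | cons y bs =>
      by_cases h : x = y
      · subst h; simpa [cp] using ih bs
      · simp [cp, h]

theorem prefix_cp {c a b : List Char} (ha : c <+: a) (hb : c <+: b) : c <+: cp a b := by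
  induction c generalizing a b with
  | nil => exact List.nil_prefix
  | cons x cs ih =>
    cases a with
    | nil => exact absurd ha (by simp)
    | cons a0 as =>
      cases b with
      | nil => exact absurd hb (by simp)
      | cons b0 bs =>
        rcases List.cons_prefix_cons.1 ha with ⟨rfl, ha'⟩
        rcases List.cons_prefix_cons.1 hb with ⟨rfl, hb'⟩
        rw [show cp (x :: as) (x :: bs) = x :: cp as bs from by simp [cp]]
        exact List.cons_prefix_cons.2 ⟨rfl, ih ha' hb'⟩

theorem cp_take (a b : List Char) : cp (a.take b.length) b = cp a b := by
  induction a generalizing b with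
  | nil => simp
  | cons x as ih =>
    cases b with
    | nil => simp [cp_nil_right]
    | cons y bs => by_cases h : x = y <;> simp [cp, h, ih]

-- A's indexed scan computes cp
theorem dedentGo_eq (ps : List Char) : ∀ (qs pre common : List Char), ps.length ≤ qs.length →
    dedentGo (pre ++ qs) pre.length ps common = common ++ cp ps qs := by
  induction ps with
  | nil => intro qs pre common _; cases qs <;> simp [dedentGo, cp]
  | cons x rest ih =>
    intro qs pre common hlen
    cases qs with
    | nil => simp at hlen
    | cons q qt =>
      by_cases h : q = x
      · subst h
        have : dedentGo (pre ++ q :: qt) pre.length (q :: rest) common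
            = dedentGo (pre ++ q :: qt) (pre.length + 1) rest (common ++ [q]) := by
          simp [dedentGo]
        rw [this]
        have h2 := ih qt (pre ++ [q]) (common ++ [q]) (by simpa using Nat.le_of_succ_le_succ hlen)
        simp only [List.append_assoc, List.singleton_append, List.length_append,
          List.length_singleton] at h2
        rw [h2]
        simp [cp]
      · have : dedentGo (pre ++ q :: qt) pre.length (x :: rest) common = common := by
          simp [dedentGo, h]
        rw [this]
        have hxq : x ≠ q := fun hh => h hh.symm
        simp [cp, hxq]

theorem dedentGo_spec (pfx indent : List Char) :
    dedentGo indent 0 (PySem.List.slice pfx none (some (indent.length : Int))) [] = cp pfx indent := by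
  have hs : PySem.List.slice pfx none (some ((indent.length : Nat) : Int)) = pfx.take indent.length :=
    PySem.List.slice_to_natCast pfx indent.length
  rw [hs]
  have := dedentGo_eq (pfx.take indent.length) indent [] []
    (by simpa using Nat.min_le_right pfx.length indent.length)
  simpa [cp_take] using this

-- both ports compute the same per-line indent
theorem lstrip_length_le (l : List Char) : (PySem.Chars.lstrip l).length ≤ l.length := by
  simpa [PySem.Chars.lstrip] using List.length_dropWhile_le PySem.Chars.isspace l

theorem indent_eq (line : List Char) :
    dedentIndent line = line.take (line.length - (PySem.Chars.lstrip line).length) := by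
  unfold dedentIndent
  by_cases h : (PySem.Chars.lstrip line).length = 0
  · simp [h]
  · rw [if_pos h, PySem.List.slice_to_neg_natCast line _ (Nat.pos_of_ne_zero h)]

theorem altIndent_eq (line : List Char) :
    altIndent line = line.take (line.length - (PySem.Chars.lstrip line).length) := by
  unfold altIndent
  have h := lstrip_length_le line
  have hc : (line.length : Int) - ((PySem.Chars.lstrip line).length : Int)
      = ((line.length - (PySem.Chars.lstrip line).length : Nat) : Int) := by omega
  rw [hc, PySem.List.slice_to_natCast]

-- A's loop as a fold of cp over the indents
theorem dedentLoop_some (ls : List (List Char)) : ∀ (p : List Char),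
    dedentLoop ls (some p) = some (ls.foldl (fun q l => cp q (dedentIndent l)) p) := by
  induction ls with
  | nil => intro p; rfl
  | cons l ls ih =>
    intro p
    simp only [dedentLoop, List.foldl_cons]
    rw [dedentGo_spec, ih]

-- order on List Char is lex (Mathlib's linearOrderOfSTO over List.Lex)
theorem le_lex {l₁ l₂ : List Char} : l₁ ≤ l₂ ↔ l₁ = l₂ ∨ List.Lex (· < ·) l₁ l₂ := Iff.rfl

theorem cp_prefix_of_between : ∀ (lo x hi : List Char), lo ≤ x → x ≤ hi → cp lo hi <+: x := by
  intro lo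
  induction lo with
  | nil => intro x hi _ _; simp [cp_nil_left]
  | cons c lo' ih =>
    intro x hi h1 h2
    cases hi with
    | nil => simp [cp_nil_right]
    | cons d hi' =>
      by_cases hcd : c = d
      · subst hcd
        cases x with
        | nil =>
          rcases le_lex.1 h1 with h | h
          · exact absurd h (by simp)
          · cases h
        | cons e x' =>
          have h1' : c < e ∨ (c = e ∧ lo' ≤ x') := by
            rcases le_lex.1 h1 with h | h
            · injection h with ha hb; exact Or.inr ⟨ha, le_of_eq hb⟩
            · cases h with
              | cons h => exact Or.inr ⟨rfl, le_lex.2 (Or.inr h)⟩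
              | rel h => exact Or.inl h
          have h2' : e < c ∨ (e = c ∧ x' ≤ hi') := by
            rcases le_lex.1 h2 with h | h
            · injection h with ha hb; exact Or.inr ⟨ha, le_of_eq hb⟩
            · cases h with
              | cons h => exact Or.inr ⟨rfl, le_lex.2 (Or.inr h)⟩
              | rel h => exact Or.inl h
          rcases h1' with h1' | ⟨rfl, hle1⟩
          · rcases h2' with h2' | ⟨rfl, _⟩
            · exact absurd h1' (asymm h2')
            · exact absurd h1' (lt_irrefl _)
          · rcases h2' with h2' | ⟨_, hle2⟩
            · exact absurd h2' (lt_irrefl _)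
            · simp only [cp]
              exact (List.cons_prefix_cons).2 ⟨rfl, ih x' hi' hle1 hle2⟩
      · simp [cp, hcd]

theorem foldl_cp_prefix_seed (l : List (List Char)) : ∀ s, l.foldl cp s <+: s := by
  induction l with
  | nil => intro s; simp
  | cons a l ih => intro s; exact (ih (cp s a)).trans (cp_prefix_left s a)

theorem foldl_cp_prefix_mem (l : List (List Char)) : ∀ (s x : List Char), x ∈ l → l.foldl cp s <+: x := by
  induction l with
  | nil => intro s x hx; simp at hx
  | cons a l ih =>
    intro s x hx
    rcases List.mem_cons.1 hx with rfl | hx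
    · exact (foldl_cp_prefix_seed l (cp s x)).trans (cp_prefix_right s x)
    · exact ih (cp s a) x hx

theorem foldl_cp_greatest (l : List (List Char)) : ∀ (s c : List Char), c <+: s → (∀ x ∈ l, c <+: x) →
    c <+: l.foldl cp s := by
  induction l with
  | nil => intro s c h _; simpa using h
  | cons a l ih =>
    intro s c hs hl
    exact ih (cp s a) c (prefix_cp hs (hl a (by simp))) (fun x hx => hl x (by simp [hx]))

-- the heart: the fold of cp over a nonempty list is cp of its lexicographic min and max
theorem foldl_cp_eq_cp_min_max (i0 : List Char) (irest : List (List Char)) :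
    irest.foldl cp i0 = cp (irest.foldl min i0) (irest.foldl max i0) := by
  have hminS := PySem.List.min?_id_cons (κ := List Char) i0 irest
  have hmaxS := PySem.List.max?_id_cons (κ := List Char) i0 irest
  have hminMem : irest.foldl min i0 ∈ i0 :: irest :=
    @PySem.List.min?_mem (List Char) (List Char) List.instLinearOrder.toLT
      LinearOrder.toDecidableLT _ _ _ hminS
  have hmaxMem : irest.foldl max i0 ∈ i0 :: irest :=
    @PySem.List.max?_mem (List Char) (List Char) List.instLinearOrder.toLT
      LinearOrder.toDecidableLT _ _ _ hmaxS
  have hminLe : ∀ y ∈ i0 :: irest, irest.foldl min i0 ≤ y := by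
    intro y hy; exact PySem.List.min?_isMin hminS y hy
  have hmaxGe : ∀ y ∈ i0 :: irest, y ≤ irest.foldl max i0 := by
    intro y hy; exact PySem.List.max?_isMax hmaxS y hy
  have hPmem : ∀ x ∈ i0 :: irest, irest.foldl cp i0 <+: x := by
    intro x hx
    rcases List.mem_cons.1 hx with rfl | hx
    · exact foldl_cp_prefix_seed irest x
    · exact foldl_cp_prefix_mem irest i0 x hx
  refine List.IsPrefix.eq_of_length_le (prefix_cp (hPmem _ hminMem) (hPmem _ hmaxMem)) ?_
  refine List.IsPrefix.length_le ?_
  apply foldl_cp_greatest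
  · exact cp_prefix_of_between _ _ _ (hminLe i0 (by simp)) (hmaxGe i0 (by simp))
  · intro x hx
    exact cp_prefix_of_between _ _ _ (hminLe x (by simp [hx])) (hmaxGe x (by simp [hx]))

-- the length A strips equals the k B strips, for a nonempty line list
theorem strip_len_eq (l : List Char) (ls : List (List Char)) :
    ((dedentLoop (l :: ls) none).getD []).length
      = altK ((PySem.List.min? ((l :: ls).map altIndent) (fun x => x)).getD [])
             ((PySem.List.max? ((l :: ls).map altIndent) (fun x => x)).getD []) := by
  have h1 : dedentLoop (l :: ls) none = dedentLoop ls (some (dedentIndent l)) := rfl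
  rw [h1, dedentLoop_some, Option.getD_some]
  have h2 : ls.foldl (fun q x => cp q (dedentIndent x)) (dedentIndent l)
      = (ls.map dedentIndent).foldl cp (dedentIndent l) := by rw [List.foldl_map]
  rw [h2, foldl_cp_eq_cp_min_max]
  have hfun : altIndent = dedentIndent := funext fun x => (altIndent_eq x).trans (indent_eq x).symm
  have hmap : List.map altIndent (l :: ls) = dedentIndent l :: ls.map dedentIndent := by
    rw [hfun, List.map_cons]
  rw [hmap, altK_eq_length_cp]
  have hminS : PySem.List.min? (dedentIndent l :: ls.map dedentIndent) (fun x => x)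
      = some ((ls.map dedentIndent).foldl min (dedentIndent l)) := by
    have h := PySem.List.min?_id_cons (κ := List Char) (dedentIndent l) (ls.map dedentIndent)
    convert h using 2
  have hmaxS : PySem.List.max? (dedentIndent l :: ls.map dedentIndent) (fun x => x)
      = some ((ls.map dedentIndent).foldl max (dedentIndent l)) := by
    have h := PySem.List.max?_id_cons (κ := List Char) (dedentIndent l) (ls.map dedentIndent)
    convert h using 2
  rw [hminS, hmaxS, Option.getD_some, Option.getD_some]

-- the whole equality, for any line list (the shape both ports share after splitlines/skip)
theorem dedent_main (lines : List (List Char)) :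
    String.mk (PySem.Chars.join ['\n'] (lines.map (fun line =>
        PySem.List.slice line (some ((((dedentLoop lines none).getD []).length : Nat) : Int)) none)))
    = (if lines = [] then "" else
       String.mk (PySem.Chars.join ['\n'] (lines.map (fun line =>
        PySem.List.slice line (some ((altK
          ((PySem.List.min? (lines.map altIndent) (fun x => x)).getD [])
          ((PySem.List.max? (lines.map altIndent) (fun x => x)).getD []) : Nat) : Int)) none)))) := by
  cases lines with
  | nil => rfl
  | cons l ls =>
    rw [if_neg (by simp), strip_len_eq]

-- ===== VERDICT (by name: the statement is the Claim_ definition above) =====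
theorem dedent_spec : Claim_equal_dedent := by
  intro text skipLeadingEmpty _
  unfold Spec_dedent dedent dedent_alt
  exact dedent_main _
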